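-- pv_equiv track=rewrite | github.com/fabioantonioastore/Euler-Project | problem_19.py | distance_day
-- ===== SOURCE A (Python) =====
-- WEEK = 7
--
-- def is_leap_year(year: int) -> bool:
--     if year % 4 == 0 and not (year % 100 == 0 and not year % 400 == 0):
--         return True
--     return False
--
-- def distance_day(year: int) -> int:
--     distance = 1
--     for i in range(1900, year):
--         days = 365
--         if is_leap_year(i):
--             days += 1
--         distance += days % WEEK
--     return distance % WEEK
-- ===== SOURCE B (Python) =====
-- def distance_day(year: int) -> int:
--     if year <= 1900:
--         return 1
--     y = year - 1
--     leaps = y // 4 - y // 100 + y // 400 - 460  # 460 = number of leap years before 1900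
--     return (1 + (year - 1900) + leaps) % 7
-- ===== Notes on version B (the rewrite author's own statement) =====
-- stated objective: faster
-- what changed: Replaces the year-by-year loop with a closed-form count of leap years via floor divisions, computing the weekday offset in O(1).
import Mathlib
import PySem

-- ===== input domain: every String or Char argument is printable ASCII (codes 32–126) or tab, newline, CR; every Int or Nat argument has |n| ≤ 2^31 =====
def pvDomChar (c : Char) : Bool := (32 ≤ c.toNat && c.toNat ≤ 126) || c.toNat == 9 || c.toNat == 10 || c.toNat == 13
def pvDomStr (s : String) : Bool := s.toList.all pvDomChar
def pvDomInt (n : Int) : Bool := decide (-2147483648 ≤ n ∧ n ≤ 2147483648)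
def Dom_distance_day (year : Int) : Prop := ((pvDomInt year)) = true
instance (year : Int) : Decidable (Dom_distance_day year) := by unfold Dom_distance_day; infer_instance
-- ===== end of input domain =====

-- B replaces A's year-by-year loop with a closed-form leap-year count (O(1) vs O(year)).


-- ===== PORT A =====
def is_leap_year (year : Int) : Bool :=
  if PySem.Int.mod year 4 == 0 && !(PySem.Int.mod year 100 == 0 && !(PySem.Int.mod year 400 == 0)) then
    true
  else
    false

def distance_day (year : Int) : Int :=
  let distance : Int := (PySem.List.pyRange 1900 year 1).foldl
    (fun distance i =>
      let days : Int := 365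
      let days := if is_leap_year i then days + 1 else days
      distance + PySem.Int.mod days 7) 1
  PySem.Int.mod distance 7

-- ===== PORT B =====
def distance_day_alt (year : Int) : Int :=
  if year ≤ 1900 then 1
  else
    let y := year - 1
    let leaps := PySem.Int.floordiv y 4 - PySem.Int.floordiv y 100 + PySem.Int.floordiv y 400 - 460
    PySem.Int.mod (1 + (year - 1900) + leaps) 7

-- ===== PRECONDITION & SPEC =====
def Spec_distance_day (year : Int) (out : Int) : Prop := out = distance_day_alt year
instance (year : Int) (out : Int) : Decidable (Spec_distance_day year out) := by unfold Spec_distance_day; infer_instance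

-- ===== CLAIM (what is proved, stated in full; the proofs are below) =====
def Claim_equal_distance_day : Prop := ∀ (year : Int), Dom_distance_day year → Spec_distance_day year (distance_day year)

-- ===== LEMMAS AND PROOFS =====

-- the accumulated value of A's loop, in closed form
theorem distance_day_loop_closed (n : Nat) :
    (PySem.List.pyRange 1900 (1900 + (n : Int)) 1).foldl
      (fun distance i =>
        let days : Int := 365
        let days := if is_leap_year i then days + 1 else days
        distance + PySem.Int.mod days 7) 1
    = 1 + (n : Int) +
      ((1900 + (n : Int) - 1) / 4 - (1900 + (n : Int) - 1) / 100 + (1900 + (n : Int) - 1) / 400 - 460) := by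
  induction n with
  | zero =>
    rw [show (1900 + ((0 : Nat) : Int)) = 1900 by norm_num,
        PySem.List.pyRange_one_eq_nil (by norm_num)]
    decide
  | succ m ih =>
    have h1 : (1900 + ((m + 1 : Nat) : Int)) = (1900 + (m : Int)) + 1 := by push_cast; ring
    rw [h1, PySem.List.pyRange_one_succ_right (by omega), List.foldl_append, ih]
    simp only [List.foldl_cons, List.foldl_nil]
    set y : Int := 1900 + (m : Int) with hy
    have hc : (is_leap_year y = true) ↔ (y % 4 = 0 ∧ ¬(y % 100 = 0 ∧ y % 400 ≠ 0)) := by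
      simp only [is_leap_year,
        PySem.Int.mod_eq_emod_of_pos (show (0:Int) < 4 by norm_num),
        PySem.Int.mod_eq_emod_of_pos (show (0:Int) < 100 by norm_num),
        PySem.Int.mod_eq_emod_of_pos (show (0:Int) < 400 by norm_num)]
      simp
      tauto
    by_cases hleap : y % 4 = 0 ∧ ¬(y % 100 = 0 ∧ y % 400 ≠ 0)
    · rw [if_pos (hc.mpr hleap), show PySem.Int.mod ((365:Int) + 1) 7 = 2 from by decide]
      obtain ⟨h4, hrest⟩ := hleap
      have e4 : y / 4 = (y - 1) / 4 + 1 := by omega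
      by_cases h100 : y % 100 = 0
      · have h400 : y % 400 = 0 := by by_contra hx; exact hrest ⟨h100, hx⟩
        have e100 : y / 100 = (y - 1) / 100 + 1 := by omega
        have e400 : y / 400 = (y - 1) / 400 + 1 := by omega
        push_cast
        omega
      · have e100 : y / 100 = (y - 1) / 100 := by omega
        have e400 : y / 400 = (y - 1) / 400 := by omega
        push_cast
        omega
    · rw [if_neg (fun h => hleap (hc.mp h)), show PySem.Int.mod (365:Int) 7 = 1 from by decide]
      by_cases h4 : y % 4 = 0
      · have h100 : y % 100 = 0 := by
          by_contra hx
          exact hleap ⟨h4, fun hh => hx hh.1⟩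
        have h400 : y % 400 ≠ 0 := by
          intro hx
          exact hleap ⟨h4, fun hh => hh.2 hx⟩
        have e4 : y / 4 = (y - 1) / 4 + 1 := by omega
        have e100 : y / 100 = (y - 1) / 100 + 1 := by omega
        have e400 : y / 400 = (y - 1) / 400 := by omega
        push_cast
        omega
      · have e4 : y / 4 = (y - 1) / 4 := by omega
        have e100 : y / 100 = (y - 1) / 100 := by omega
        have e400 : y / 400 = (y - 1) / 400 := by omega
        push_cast
        omega

-- ===== VERDICT (by name: the statement is the Claim_ definition above) =====
theorem distance_day_spec : Claim_equal_distance_day := by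
  intro year _
  unfold Spec_distance_day distance_day distance_day_alt
  by_cases h : year ≤ 1900
  · rw [PySem.List.pyRange_one_eq_nil (by omega), if_pos h]
    decide
  · rw [if_neg h]
    have hn : year = 1900 + ((year - 1900).toNat : Int) := by omega
    rw [hn, distance_day_loop_closed]
    simp only [PySem.Int.floordiv_eq_ediv_of_pos (show (0:Int) < 4 by norm_num),
      PySem.Int.floordiv_eq_ediv_of_pos (show (0:Int) < 100 by norm_num),
      PySem.Int.floordiv_eq_ediv_of_pos (show (0:Int) < 400 by norm_num)]
    congr 1
    omega
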